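-- pv_equiv track=rewrite | github.com/hyunseo0/programmers | highscore_kit/stack_queue_2.py | solution
-- ===== SOURCE A (Python) =====
-- import math
--
-- def solution(progresses, speeds):
--     day_list = []
--     launch_list = []
--
--     for i in range(len(progresses)):
--         day = math.ceil((100 - progresses[i])/speeds[i])
--         day_list.append(day)
--
--     launch = 0
--
--     for i in day_list:
--         if launch < i:
--             launch = i
--         else:
--             i = launch
--         launch_list.append(i)
--
--     answer = []
--     seen = set()
--
--     for num in launch_list:
--         if num not in seen:
--             count = launch_list.count(num)
--             answer.append(count)
--             seen.add(num)
--
--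
--     return answer
-- ===== SOURCE B (Python) =====
-- def solution(progresses, speeds):
--     # One pass: the release-day list is a running maximum (nondecreasing), so
--     # equal values are consecutive; count run lengths on the fly.
--     answer = []
--     launch = 0
--     count = 0
--     for p, s in zip(progresses, speeds):
--         day = -(-(100 - p) // s)  # exact ceil division
--         if launch < day:
--             if count:
--                 answer.append(count)
--             launch = day
--             count = 1
--         else:
--             count += 1
--     if count:
--         answer.append(count)
--     return answer
-- ===== Notes on version B (the rewrite author's own statement) =====
-- stated objective: alternative
-- what changed: Instead of building the day list and the running-max list and then re-scanning the whole running-max list with list.count for each first-seen value, B does a single pass over zip(progresses, speeds), maintaining the running maximum and the length of the current run of equal values, exploiting that the running-max list is nondecreasing so equal values are consecutive; intended as faster (O(n) vs O(n*k) for k distinct release days; measured 1.67x at the largest size but not consistently >=1.5x).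
import Mathlib
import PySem

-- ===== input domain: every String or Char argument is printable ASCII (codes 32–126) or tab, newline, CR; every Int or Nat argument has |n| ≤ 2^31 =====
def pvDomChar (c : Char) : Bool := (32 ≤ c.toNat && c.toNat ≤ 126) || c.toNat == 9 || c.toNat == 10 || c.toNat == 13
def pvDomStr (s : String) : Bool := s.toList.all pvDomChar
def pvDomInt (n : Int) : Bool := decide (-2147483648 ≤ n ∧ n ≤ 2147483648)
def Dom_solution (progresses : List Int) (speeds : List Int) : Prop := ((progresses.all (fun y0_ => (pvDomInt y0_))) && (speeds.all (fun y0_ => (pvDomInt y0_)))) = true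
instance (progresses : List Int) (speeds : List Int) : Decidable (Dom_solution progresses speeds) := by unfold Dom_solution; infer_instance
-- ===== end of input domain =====

-- B replaces A's list.count re-scans of the running-max list by a single pass that counts
-- runs of consecutive equal running maxima (the running-max list is nondecreasing).


-- ===== PORT A =====
-- math.ceil((100 - p)/s): on Dom the numerator and divisor have magnitude < 2^53, so the
-- float division is exact enough that math.ceil of it equals exact ceiling division,
-- ported as -((-n) // s) with Python floor division.
def pyCeil (n s : Int) : Int := -(PySem.Int.floordiv (-n) s)

def solution (progresses : List Int) (speeds : List Int) : List Int :=
  -- for i in range(len(progresses)): day_list.append(math.ceil((100-progresses[i])/speeds[i]))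
  let day_list := (PySem.List.pyRange 0 (progresses.length : Int) 1).foldl
    (fun acc i => acc ++ [pyCeil (100 - PySem.List.pyGetD progresses i 0) (PySem.List.pyGetD speeds i 0)]) []
  -- launch = 0; for i in day_list: …; launch_list.append(i)
  let st := day_list.foldl
    (fun (st : Int × List Int) i =>
      if st.1 < i then (i, st.2 ++ [i]) else (st.1, st.2 ++ [st.1])) (0, [])
  let launch_list := st.2
  -- answer = []; seen = set(); for num in launch_list: …
  let fin := launch_list.foldl
    (fun (st : List Int × PySem.Set Int) num =>
      if ¬ (PySem.Set.contains st.2 num) then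
        (st.1 ++ [(PySem.List.count launch_list num : Int)], PySem.Set.add st.2 num)
      else st) ([], PySem.Set.empty)
  fin.1

-- ===== PORT B =====
def solution_alt (progresses : List Int) (speeds : List Int) : List Int :=
  let st := (progresses.zip speeds).foldl
    (fun (st : List Int × Int × Int) q =>
      let day := -(PySem.Int.floordiv (-(100 - q.1)) q.2)
      if st.2.1 < day then
        ((if st.2.2 ≠ 0 then st.1 ++ [st.2.2] else st.1), day, 1)
      else (st.1, st.2.1, st.2.2 + 1)) ([], 0, 0)
  if st.2.2 ≠ 0 then st.1 ++ [st.2.2] else st.1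

-- ===== PRECONDITION & SPEC =====
-- A raises IndexError when speeds is shorter than progresses, and ZeroDivisionError when a
-- used speed is 0; Pre_ excludes exactly those inputs.
def Pre_solution (progresses : List Int) (speeds : List Int) : Prop :=
  progresses.length ≤ speeds.length ∧ ∀ s ∈ speeds.take progresses.length, s ≠ 0
instance (progresses : List Int) (speeds : List Int) : Decidable (Pre_solution progresses speeds) := by unfold Pre_solution; infer_instance

def pvWitness_solution : List Int × List Int := ([93, 30, 55], [1, 30, 5])

def Spec_solution (progresses : List Int) (speeds : List Int) (out : List Int) : Prop := out = solution_alt progresses speeds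
instance (progresses : List Int) (speeds : List Int) (out : List Int) : Decidable (Spec_solution progresses speeds out) := by unfold Spec_solution; infer_instance

-- ===== CLAIM (what is proved, stated in full; the proofs are below) =====
def Claim_equal_solution : Prop := ∀ (progresses : List Int) (speeds : List Int), Dom_solution progresses speeds → Pre_solution progresses speeds → Spec_solution progresses speeds (solution progresses speeds)

-- ===== LEMMAS AND PROOFS =====

-- the running-max list produced by A's second loop, starting from launch value l
def runMax (l : Int) : List Int → List Int
  | [] => []
  | i :: d => if l < i then i :: runMax i d else l :: runMax l d

-- run-length counts of a nondecreasing list whose leading run value is v (leading v's dropped)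
def tailRuns (v : Int) : List Int → List Int
  | [] => []
  | x :: xs => if x = v then tailRuns v xs else ((x :: xs).count x : Int) :: tailRuns x xs

-- every element of runMax l d is ≥ the seed l
theorem mem_runMax_le : ∀ (d : List Int) (l x : Int), x ∈ runMax l d → l ≤ x := by
  intro d
  induction d with
  | nil => intro l x hx; simp [runMax] at hx
  | cons i d ih =>
    intro l x hx
    simp only [runMax] at hx
    by_cases h : l < i
    · simp [h] at hx
      rcases hx with rfl | hx
      · omega
      · have := ih i x hx; omega
    · simp [h] at hx
      rcases hx with rfl | hx
      · omega
      · exact ih l x hx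

-- A's second loop builds acc ++ runMax l d
theorem launch_eq : ∀ (d : List Int) (l : Int) (acc : List Int),
    (d.foldl (fun (st : Int × List Int) i =>
      if st.1 < i then (i, st.2 ++ [i]) else (st.1, st.2 ++ [st.1])) (l, acc)).2
    = acc ++ runMax l d := by
  intro d
  induction d with
  | nil => intro l acc; simp [runMax]
  | cons i d ih =>
    intro l acc
    simp only [List.foldl_cons, runMax]
    by_cases h : l < i
    · simp [h, ih]
    · simp [h, ih]

-- A's third loop over a runMax list yields its run-length counts
theorem A_run : ∀ (d : List Int) (l : Int) (F ans : List Int) (seen : PySem.Set Int),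
    l ∈ seen → (∀ y ∈ seen, y ≤ l) →
    (∀ w ∈ runMax l d, w ≠ l → F.count w = (runMax l d).count w) →
    ((runMax l d).foldl
      (fun (st : List Int × PySem.Set Int) num =>
        if ¬ (PySem.Set.contains st.2 num) then
          (st.1 ++ [(PySem.List.count F num : Int)], PySem.Set.add st.2 num)
        else st) (ans, seen)).1
    = ans ++ tailRuns l (runMax l d) := by
  intro d
  induction d with
  | nil => intro l F ans seen _ _ _; simp [runMax, tailRuns]
  | cons i d ih =>
    intro l F ans seen hmem hle hcnt
    simp only [runMax] at hcnt ⊢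
    by_cases h : l < i
    · rw [if_pos h] at hcnt ⊢
      simp only [List.foldl_cons, tailRuns]
      have hni : ¬ i ∈ seen := fun hin => absurd (hle i hin) (by omega)
      have hic : PySem.Set.contains seen i = false := by
        rw [Bool.eq_false_iff]
        intro hc
        exact hni ((PySem.Set.contains_iff seen i).mp hc)
      rw [if_neg (show ¬ i = l by omega)]
      simp only [hic, Bool.false_eq_true, not_false_iff, if_pos]
      rw [ih i F (ans ++ [(PySem.List.count F i : Int)]) (PySem.Set.add seen i)
          (by rw [PySem.Set.mem_add]; right; rfl)
          (by intro y hy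
              rcases (PySem.Set.mem_add seen i y).mp hy with hy | rfl
              · have := hle y hy; omega
              · omega)
          (by intro w hw hwne
              have hwi := mem_runMax_le d i w hw
              have := hcnt w (by simp [hw]) (by omega)
              simpa [List.count_cons, show ¬ i = w by omega] using this)]
      have hFi : F.count i = ((i :: runMax i d).count i) :=
        hcnt i (by simp) (by omega)
      simp [PySem.List.count, hFi, List.count_cons]
    · rw [if_neg h] at hcnt ⊢
      simp only [List.foldl_cons, tailRuns, if_pos rfl]
      have hlc : PySem.Set.contains seen l = true := (PySem.Set.contains_iff seen l).mpr hmem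
      simp only [hlc, not_true, if_neg, Bool.true_eq_false, not_false_iff, ite_false,
        not_true_eq_false, if_false]
      exact ih l F ans seen hmem hle
          (by intro w hw hwne
              have := hcnt w (by simp [hw]) hwne
              simpa [List.count_cons, show ¬ l = w from fun hh => hwne hh.symm] using this)

-- B's loop step and final flush, as named helpers for the proof
def bstep (st : List Int × Int × Int) (day : Int) : List Int × Int × Int :=
  if st.2.1 < day then
    ((if st.2.2 ≠ 0 then st.1 ++ [st.2.2] else st.1), day, 1)
  else (st.1, st.2.1, st.2.2 + 1)

def bfin (st : List Int × Int × Int) : List Int :=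
  if st.2.2 ≠ 0 then st.1 ++ [st.2.2] else st.1

-- B's loop-with-flush computes the pending run count then the remaining run counts
theorem B_run : ∀ (d : List Int) (ans : List Int) (v c : Int), 1 ≤ c →
    bfin (d.foldl bstep (ans, v, c))
    = ans ++ (c + ((runMax v d).count v : Int)) :: tailRuns v (runMax v d) := by
  intro d
  induction d with
  | nil =>
    intro ans v c hc
    simp [bfin, runMax, tailRuns, show c ≠ 0 by omega]
  | cons i d ih =>
    intro ans v c hc
    simp only [List.foldl_cons, runMax]
    by_cases h : v < i
    · have hstep : bstep (ans, v, c) i = (ans ++ [c], i, 1) := by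
        simp [bstep, h, show c ≠ 0 by omega]
      rw [hstep, ih (ans ++ [c]) i 1 (by omega), if_pos h]
      have hcv : (i :: runMax i d).count v = 0 := by
        rw [List.count_eq_zero]
        intro hv
        rcases List.mem_cons.mp hv with rfl | hv
        · omega
        · have := mem_runMax_le d i v hv; omega
      simp [tailRuns, hcv, if_neg (show ¬ i = v by omega), List.count_cons]
      omega
    · have hstep : bstep (ans, v, c) i = (ans, v, c + 1) := by
        simp [bstep, h]
      rw [hstep, ih ans v (c + 1) (by omega), if_neg h]
      simp [tailRuns, List.count_cons]
      push_cast
      ring_nf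

-- A's indexed day loop equals a map over the zipped lists (needs len p ≤ len s)
theorem days_eq (p s : List Int) (h : p.length ≤ s.length) :
    (PySem.List.pyRange 0 (p.length : Int) 1).foldl
      (fun acc i => acc ++ [pyCeil (100 - PySem.List.pyGetD p i 0) (PySem.List.pyGetD s i 0)]) []
    = (p.zip s).map (fun q => pyCeil (100 - q.1) q.2) := by
  rw [PySem.List.foldl_append_singleton_eq_map, PySem.List.pyRange_one, List.map_map]
  simp only [List.nil_append]
  apply List.ext_getElem
  · simp [Nat.min_eq_left h]
  · intro k h1 h2
    simp only [List.getElem_map, List.getElem_range, List.getElem_zip, Function.comp_apply]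
    have hk : k < p.length := by simpa using h1
    rw [show ((0 : Int) + (k : Int)) = ((k : Nat) : Int) by omega,
        PySem.List.pyGetD_natCast, PySem.List.pyGetD_natCast]
    rw [List.getD_eq_getElem p 0 hk, List.getD_eq_getElem s 0 (by omega)]

theorem solution_spec : Claim_equal_solution := by
  intro p s _hdom hpre
  obtain ⟨hlen, -⟩ := hpre
  unfold Spec_solution solution solution_alt
  simp only []
  have hB : ∀ (init : List Int × Int × Int),
      (p.zip s).foldl
        (fun (st : List Int × Int × Int) q =>
          let day := -(PySem.Int.floordiv (-(100 - q.1)) q.2)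
          if st.2.1 < day then
            ((if st.2.2 ≠ 0 then st.1 ++ [st.2.2] else st.1), day, 1)
          else (st.1, st.2.1, st.2.2 + 1)) init
      = ((p.zip s).map (fun q : Int × Int => pyCeil (100 - q.1) q.2)).foldl bstep init := by
    intro init
    rw [List.foldl_map]
    rfl
  have hfin : ∀ st : List Int × Int × Int,
      (if st.2.2 ≠ 0 then st.1 ++ [st.2.2] else st.1) = bfin st := fun _ => rfl
  rw [days_eq p s hlen, hB, hfin, launch_eq]
  simp only [List.nil_append]
  cases hD : (p.zip s).map (fun q : Int × Int => pyCeil (100 - q.1) q.2) with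
  | nil => simp [runMax, bfin]
  | cons i D' =>
    rw [List.foldl_cons]
    by_cases h0 : (0 : Int) < i
    · have hstep : bstep ([], 0, 0) i = ([], i, 1) := by simp [bstep, h0]
      rw [hstep, B_run D' [] i 1 (by omega)]
      simp only [runMax, if_pos h0, List.foldl_cons]
      have hc0 : PySem.Set.contains (PySem.Set.empty : PySem.Set Int) i = false := rfl
      simp only [hc0, Bool.false_eq_true, not_false_iff, if_pos, List.nil_append]
      rw [A_run D' i (i :: runMax i D') [(PySem.List.count (i :: runMax i D') i : Int)]
            (PySem.Set.add PySem.Set.empty i)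
            (by rw [PySem.Set.mem_add]; right; rfl)
            (by intro y hy
                rcases (PySem.Set.mem_add _ i y).mp hy with hy | rfl
                · simp [PySem.Set.empty] at hy
                · omega)
            (by intro w hw hwne
                simp [List.count_cons, show ¬ i = w from fun hh => hwne hh.symm])]
      simp [PySem.List.count, List.count_cons]
      omega
    · have hstep : bstep ([], 0, 0) i = ([], 0, 1) := by simp [bstep, h0]
      rw [hstep, B_run D' [] 0 1 (by omega)]
      simp only [runMax, if_neg h0, List.foldl_cons]
      have hc0 : PySem.Set.contains (PySem.Set.empty : PySem.Set Int) (0 : Int) = false := rfl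
      simp only [hc0, Bool.false_eq_true, not_false_iff, if_pos, List.nil_append]
      rw [A_run D' 0 ((0 : Int) :: runMax 0 D') [(PySem.List.count ((0 : Int) :: runMax 0 D') 0 : Int)]
            (PySem.Set.add PySem.Set.empty 0)
            (by rw [PySem.Set.mem_add]; right; rfl)
            (by intro y hy
                rcases (PySem.Set.mem_add _ 0 y).mp hy with hy | rfl
                · simp [PySem.Set.empty] at hy
                · omega)
            (by intro w hw hwne
                simp [List.count_cons, show ¬ (0 : Int) = w from fun hh => hwne hh.symm])]
      simp [PySem.List.count, List.count_cons]
      omega
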